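-- pv_equiv track=rewrite | github.com/Shilenkovv/Algorithms_PyGen_bg | 10_Optimization_methods_for_problem_solving/10_3_10.py | could_type
-- ===== SOURCE A (Python) =====
-- def could_type(word: str, typed: str) -> bool:
--     left, right = 0, 0
--
--     while left < len(word):
--         found = False
--         while right < len(typed) and word[left] == typed[right]:
--             right += 1
--             found = True
--             if left < len(word) - 1 and word[left] == word[left + 1]:
--                 break
--         left += 1
--         if not found:
--             return False
--     return left == len(word) and right == len(typed)
-- ===== SOURCE B (Python) =====
-- def could_type(word: str, typed: str) -> bool:
--     wr, tr = _runs(word), _runs(typed)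
--     return len(wr) == len(tr) and all(
--         wc == tc and wn <= tn for (wc, wn), (tc, tn) in zip(wr, tr)
--     )
--
--
-- def _runs(s):
--     out = []
--     i = 0
--     while i < len(s):
--         j = i
--         while j < len(s) and s[j] == s[i]:
--             j += 1
--         out.append((s[i], j - i))
--         i = j
--     return out
-- ===== Notes on version B (the rewrite author's own statement) =====
-- stated objective: alternative
-- what changed: Replaces A's fused two-pointer scan with break/lookahead logic by a 'group first, compare runs' strategy: run-length encode both strings, require equally many runs, and compare runs pairwise (same char, typed count >= word count).
import Mathlib
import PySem

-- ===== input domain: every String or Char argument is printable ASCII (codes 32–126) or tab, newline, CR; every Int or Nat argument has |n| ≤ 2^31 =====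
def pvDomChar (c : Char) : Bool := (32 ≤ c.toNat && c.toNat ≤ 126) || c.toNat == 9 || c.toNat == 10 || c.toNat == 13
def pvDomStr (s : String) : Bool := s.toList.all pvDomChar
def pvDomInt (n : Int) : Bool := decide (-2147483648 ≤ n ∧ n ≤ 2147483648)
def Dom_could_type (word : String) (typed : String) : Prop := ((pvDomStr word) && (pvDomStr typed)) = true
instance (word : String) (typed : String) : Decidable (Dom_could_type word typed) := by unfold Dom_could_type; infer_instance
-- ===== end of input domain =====

-- B run-length encodes both strings and compares runs pairwise; same cost as A's two-pointer scan, plainer logic.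

-- ===== PORT A =====
-- inner `while right < len(typed) and word[left] == typed[right]` loop of A,
-- carrying (right, found); the `break` exits after one step when the next word char repeats
def ctInner (w t : List Char) (left right : Nat) (found : Bool) : Nat × Bool :=
  if _h : right < t.length ∧ w[left]? = t[right]? then
    if left < w.length - 1 ∧ w[left]? = w[left + 1]? then (right + 1, true)
    else ctInner w t left (right + 1) true
  else (right, found)
termination_by t.length - right
decreasing_by omega

-- outer `while left < len(word)` loop of A
def ctOuter (w t : List Char) (left right : Nat) : Bool :=
  if _h : left < w.length then
    let p := ctInner w t left right false
    if p.2 = false then false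
    else ctOuter w t (left + 1) p.1
  else decide (left = w.length ∧ right = t.length)
termination_by w.length - left

def could_type (word : String) (typed : String) : Bool :=
  ctOuter word.toList typed.toList 0 0

-- ===== PORT B =====
-- _runs of Source B: the inner while computing j is the leading-run length (takeWhile),
-- `i = j` restarts the outer while on the rest (dropWhile)
def ctRuns : List Char → List (Char × Nat)
  | [] => []
  | c :: l => (c, (l.takeWhile (· == c)).length + 1) :: ctRuns (l.dropWhile (· == c))
termination_by s => s.length
decreasing_by simpa using Nat.lt_succ_of_le (List.length_dropWhile_le _ _)

def could_type_alt (word : String) (typed : String) : Bool :=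
  let wr := ctRuns word.toList
  let tr := ctRuns typed.toList
  decide (wr.length = tr.length) &&
    (wr.zip tr).all (fun p => p.1.1 == p.2.1 && decide (p.1.2 ≤ p.2.2))

-- ===== PRECONDITION & SPEC =====
def Spec_could_type (word : String) (typed : String) (out : Bool) : Prop := out = could_type_alt word typed
instance (word : String) (typed : String) (out : Bool) : Decidable (Spec_could_type word typed out) := by unfold Spec_could_type; infer_instance

-- ===== CLAIM (what is proved, stated in full; the proofs are below) =====
def Claim_equal_could_type : Prop := ∀ (word : String) (typed : String), Dom_could_type word typed → Spec_could_type word typed (could_type word typed)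

-- ===== LEMMAS AND PROOFS =====

-- recursive form of B's pairwise run comparison
def mrB : List (Char × Nat) → List (Char × Nat) → Bool
  | [], [] => true
  | (wc, wn) :: ws, (tc, tn) :: ts => (wc == tc) && decide (wn ≤ tn) && mrB ws ts
  | _, _ => false

-- structural form of A's two-pointer scan on the remaining suffixes
def goAB : List Char → List Char → Bool
  | [], t => decide (t = [])
  | c :: ws, t =>
    if ws.head? = some c then
      match t with
      | [] => false
      | d :: t' => if d = c then goAB ws t' else false
    else
      let k := (t.takeWhile (· == c)).length
      if k = 0 then false else goAB ws (t.drop k)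

theorem alt_eq_mrB : ∀ (a b : List (Char × Nat)),
    (decide (a.length = b.length) &&
      (a.zip b).all (fun p => p.1.1 == p.2.1 && decide (p.1.2 ≤ p.2.2))) = mrB a b := by
  intro a
  induction a with
  | nil => intro b; cases b <;> simp [mrB]
  | cons x xs ih =>
    intro b
    cases b with
    | nil => simp [mrB]
    | cons y ys =>
      obtain ⟨xc, xn⟩ := x; obtain ⟨yc, yn⟩ := y
      simp only [mrB, ← ih ys, List.zip_cons_cons, List.all_cons, List.length_cons]
      by_cases h : xs.length = ys.length <;> by_cases h2 : xc = yc <;>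
        by_cases h3 : xn ≤ yn <;> simp [h, h2, h3]

theorem inner_break (w t : List Char) (left right : Nat) (f : Bool)
    (hb : left < w.length - 1 ∧ w[left]? = w[left + 1]?) :
    ctInner w t left right f =
      if right < t.length ∧ w[left]? = t[right]? then (right + 1, true) else (right, f) := by
  rw [ctInner]
  split_ifs <;> simp_all

theorem inner_nobreak (w t : List Char) (left : Nat) (c : Char) (hc : w[left]? = some c)
    (hnb : ¬ (left < w.length - 1 ∧ w[left]? = w[left + 1]?)) :
    ∀ (right : Nat) (f : Bool),
      ctInner w t left right f =
        (right + ((t.drop right).takeWhile (· == c)).length,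
         f || decide (((t.drop right).takeWhile (· == c)).length ≠ 0)) := by
  intro right f
  fun_induction ctInner w t left right f with
  | case1 right f h hb =>
    exact absurd hb hnb
  | case2 right f h hb ih =>
    obtain ⟨hr, he⟩ := h
    have hd : t.drop right = c :: t.drop (right + 1) := by
      rw [List.drop_eq_getElem_cons hr]
      have : t[right]? = some c := he ▸ hc
      simp_all
    rw [hd] at *
    have hcc : (c == c) = true := by simp
    simp only [List.takeWhile_cons, hcc, if_true, List.length_cons] at *
    rw [ih]
    refine Prod.ext (by simp; omega) (by simp)
  | case3 right f h =>
    rcases Nat.lt_or_ge right t.length with hr | hr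
    · have hd : t.drop right = t[right] :: t.drop (right + 1) := List.drop_eq_getElem_cons hr
      have hne : ¬ ((t[right] == c) = true) := by
        intro hcon
        exact h ⟨hr, by simp_all [beq_iff_eq.mp hcon]⟩
      rw [hd]
      simp [hne]
    · have : t.drop right = [] := List.drop_eq_nil_of_le hr
      simp [this]

theorem outer_eq_go : ∀ (w t : List Char) (left right : Nat),
    left ≤ w.length → right ≤ t.length →
    ctOuter w t left right = goAB (w.drop left) (t.drop right) := by
  intro w t left right
  fun_induction ctOuter w t left right with
  | case3 left right h =>
    intro hlw hrt
    have hlw' : left = w.length := by omega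
    subst hlw'
    rw [List.drop_length]
    show _ = goAB [] _
    rw [goAB, decide_eq_decide, List.drop_eq_nil_iff]
    omega
  | case1 left right hl p hp =>
    intro hlw hrt
    have hc : w[left]? = some w[left] := List.getElem?_eq_getElem hl
    have hw : w.drop left = w[left] :: w.drop (left + 1) := List.drop_eq_getElem_cons hl
    replace hp : (ctInner w t left right false).2 = false := hp
    by_cases hb : left < w.length - 1 ∧ w[left]? = w[left + 1]?
    · rw [inner_break w t left right false hb] at hp
      have hhd : (w.drop (left + 1)).head? = some w[left] := by
        rw [List.head?_drop]; rw [hb.2] at hc; exact hc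
      rw [hw]
      simp only [goAB]
      rw [if_pos hhd]
      by_cases hcond : right < t.length ∧ w[left]? = t[right]?
      · rw [if_pos hcond] at hp
        simp at hp
      · rcases Nat.lt_or_ge right t.length with hr | hr
        · have hd : t.drop right = t[right] :: t.drop (right + 1) := List.drop_eq_getElem_cons hr
          have hne : ¬ t[right] = w[left] := fun hcon =>
            hcond ⟨hr, by rw [hc, List.getElem?_eq_getElem hr, hcon]⟩
          rw [hd]
          dsimp only
          rw [if_neg hne]
        · rw [List.drop_eq_nil_of_le hr]
    · rw [inner_nobreak w t left (w[left]) hc hb right false] at hp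
      simp only [Bool.false_or, decide_eq_false_iff_not, not_not] at hp
      have hhd : ¬ (w.drop (left + 1)).head? = some w[left] := by
        rw [List.head?_drop]
        intro hcon
        have hlt : left + 1 < w.length := by
          by_contra hge
          rw [List.getElem?_eq_none (by omega)] at hcon
          simp at hcon
        exact hb ⟨by omega, by rw [hc, hcon]⟩
      rw [hw]
      simp only [goAB]
      rw [if_neg hhd]
      simp [hp]
  | case2 left right hl p hp ih =>
    intro hlw hrt
    have hc : w[left]? = some w[left] := List.getElem?_eq_getElem hl
    have hw : w.drop left = w[left] :: w.drop (left + 1) := List.drop_eq_getElem_cons hl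
    replace hp : ¬ (ctInner w t left right false).2 = false := hp
    replace ih : left + 1 ≤ w.length → (ctInner w t left right false).1 ≤ t.length →
        ctOuter w t (left + 1) (ctInner w t left right false).1 =
          goAB (w.drop (left + 1)) (t.drop (ctInner w t left right false).1) := ih
    show ctOuter w t (left + 1) (ctInner w t left right false).1 = _
    by_cases hb : left < w.length - 1 ∧ w[left]? = w[left + 1]?
    · rw [inner_break w t left right false hb] at hp ih ⊢
      have hhd : (w.drop (left + 1)).head? = some w[left] := by
        rw [List.head?_drop]; rw [hb.2] at hc; exact hc
      by_cases hcond : right < t.length ∧ w[left]? = t[right]?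
      · rw [if_pos hcond] at ih ⊢
        obtain ⟨hr, he⟩ := hcond
        have hd : t.drop right = t[right] :: t.drop (right + 1) := List.drop_eq_getElem_cons hr
        have heq : t[right] = w[left] := by
          rw [hc, List.getElem?_eq_getElem hr] at he
          exact (Option.some.inj he).symm
        rw [hw]
        simp only [goAB]
        rw [if_pos hhd, hd]
        dsimp only
        rw [if_pos heq]
        exact ih (by omega) (by omega)
      · rw [if_neg hcond] at hp
        simp at hp
    · rw [inner_nobreak w t left (w[left]) hc hb right false] at hp ih ⊢
      simp only [Bool.false_or, decide_eq_false_iff_not, not_not] at hp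
      have hkle : ((t.drop right).takeWhile (· == w[left])).length ≤ t.length - right := by
        have h1 : ((t.drop right).takeWhile (· == w[left])).length ≤ (t.drop right).length :=
          (List.takeWhile_sublist _).length_le
        simpa using h1
      have hhd : ¬ (w.drop (left + 1)).head? = some w[left] := by
        rw [List.head?_drop]
        intro hcon
        have hlt : left + 1 < w.length := by
          by_contra hge
          rw [List.getElem?_eq_none (by omega)] at hcon
          simp at hcon
        exact hb ⟨by omega, by rw [hc, hcon]⟩
      rw [hw]
      simp only [goAB]
      rw [if_neg hhd]
      dsimp only at ih ⊢
      rw [if_neg hp, ih (by omega) (by omega), List.drop_drop, Nat.add_comm]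

theorem mrB_step (c : Char) (n : Nat) (hn : 1 ≤ n) (rs : List (Char × Nat)) (t : List Char) :
    mrB ((c, n + 1) :: rs) (ctRuns t) =
      (match t with
       | [] => false
       | d :: t' => if d = c then mrB ((c, n) :: rs) (ctRuns t') else false) := by
  cases t with
  | nil => simp [ctRuns, mrB]
  | cons d t' =>
    dsimp only
    rw [ctRuns]
    by_cases hdc : d = c
    · subst hdc
      rw [if_pos rfl]
      cases t' with
      | nil =>
        simp only [List.takeWhile_nil, List.dropWhile_nil, List.length_nil, ctRuns, mrB]
        have : ¬ (n + 1 ≤ 0 + 1) := by omega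
        simp [this]
      | cons e t'' =>
        by_cases hed : e = d
        · subst hed
          rw [ctRuns]
          simp only [List.takeWhile_cons, beq_self_eq_true, if_true, List.dropWhile_cons,
            List.length_cons, mrB, Bool.true_and]
          congr 1
          rw [decide_eq_decide]
          omega
        · have hne : (e == d) = false := by simpa using hed
          have hde : (d == e) = false := by simpa using fun h => hed h.symm
          have h1 : ¬ (n + 1 ≤ 0 + 1) := by omega
          simp [hne, hde, h1, ctRuns, mrB]
    · have h2 : (c == d) = false := by simpa using fun h => hdc h.symm
      simp [mrB, h2, hdc]

theorem drop_len_takeWhile (p : Char → Bool) (l : List Char) :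
    l.drop (l.takeWhile p).length = l.dropWhile p := by
  induction l with
  | nil => rfl
  | cons a as ih =>
    by_cases h : p a
    · simp [h, ih]
    · simp [h]

theorem takeWhile_eq_nil_of_head (c : Char) (ws : List Char) (h : ¬ ws.head? = some c) :
    ws.takeWhile (· == c) = [] := by
  cases ws with
  | nil => rfl
  | cons a as =>
    have : ¬ a = c := by simpa using h
    simp [this]

theorem dropWhile_eq_self_of_head (c : Char) (ws : List Char) (h : ¬ ws.head? = some c) :
    ws.dropWhile (· == c) = ws := by
  cases ws with
  | nil => rfl
  | cons a as =>
    have : ¬ a = c := by simpa using h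
    simp [this]

theorem go_eq_mrB : ∀ (w t : List Char), goAB w t = mrB (ctRuns w) (ctRuns t) := by
  intro w
  induction w with
  | nil =>
    intro t
    cases t with
    | nil => simp [goAB, ctRuns, mrB]
    | cons d t' => simp [goAB, ctRuns, mrB]
  | cons c ws ih =>
    intro t
    rw [ctRuns]
    by_cases hws : ws.head? = some c
    · obtain ⟨ws', rfl⟩ : ∃ ws', ws = c :: ws' := by
        cases ws with
        | nil => simp at hws
        | cons a as => exact ⟨as, by simpa using hws⟩
      have hrw : ctRuns (c :: ws') =
          (c, ((ws'.takeWhile (· == c)).length) + 1) :: ctRuns (ws'.dropWhile (· == c)) := by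
        rw [ctRuns]
      rw [show ((c :: ws').takeWhile (· == c)).length = (ws'.takeWhile (· == c)).length + 1 by simp,
        show (c :: ws').dropWhile (· == c) = ws'.dropWhile (· == c) by simp]
      rw [mrB_step c ((ws'.takeWhile (· == c)).length + 1) (by omega) _ t]
      cases t with
      | nil => simp [goAB, hws]
      | cons d t' =>
        simp only [goAB]
        rw [if_pos hws]
        by_cases hdc : d = c
        · rw [if_pos hdc, if_pos hdc, ← hrw, ← ih t']
          simp only [goAB]
        · rw [if_neg hdc, if_neg hdc]
    · rw [takeWhile_eq_nil_of_head c ws hws, dropWhile_eq_self_of_head c ws hws]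
      simp only [List.length_nil]
      cases t with
      | nil => simp [goAB, hws, ctRuns, mrB]
      | cons d t' =>
        simp only [goAB]
        rw [if_neg hws]
        by_cases hdc : d = c
        · subst hdc
          have hk : ((d :: t').takeWhile (· == d)).length = (t'.takeWhile (· == d)).length + 1 := by
            simp
          rw [hk, ctRuns]
          simp only [mrB, beq_self_eq_true, Bool.true_and]
          have h1 : (1 ≤ (t'.takeWhile (· == d)).length + 1) := by omega
          rw [if_neg (by omega : ¬ ((t'.takeWhile (· == d)).length + 1 = 0))]
          simp only [h1, decide_true, Bool.true_and]
          rw [List.drop_succ_cons, drop_len_takeWhile, ih]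
        · have hk : ((d :: t').takeWhile (· == c)).length = 0 := by
            have : ¬ (d == c) = true := by simpa using hdc
            simp [this]
          rw [hk, if_pos rfl, ctRuns]
          have h2 : (c == d) = false := by simpa using fun h => hdc h.symm
          simp [mrB, h2]

-- ===== VERDICT (by name: the statement is the Claim_ definition above) =====
theorem could_type_spec : Claim_equal_could_type := by
  intro word typed _
  unfold Spec_could_type could_type could_type_alt
  rw [alt_eq_mrB, ← go_eq_mrB,
    show word.toList = word.toList.drop 0 by simp,
    show typed.toList = typed.toList.drop 0 by simp, ← outer_eq_go] <;> simp
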